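-- pv_equiv track=rewrite | github.com/shiningsunnyday/PT-BPE | foldingdiff/bpe.py | remove_values
-- ===== SOURCE A (Python) =====
-- def remove_values(sorted_list, remove_list):
--     """
--     Returns a new list which is sorted_list with any elements found in remove_list removed.
--     Both lists are assumed to be sorted.
--     """
--     i, j = 0, 0
--     n, m = len(sorted_list), len(remove_list)
--     result = []
--     while i < n and j < m:
--         if sorted_list[i] < remove_list[j]:
--             # Keep this element because it's not in remove_list
--             result.append(sorted_list[i])
--             i += 1
--         elif sorted_list[i] > remove_list[j]:
--             # Move remove_list pointer, because we're past this remove_list[j] in sorted_list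
--             j += 1
--         else:
--             # They are equal, so we skip this element in sorted_list
--             i += 1
--             j += 1
--     # If there are leftover elements in sorted_list that couldn't possibly be in remove_list
--     while i < n:
--         result.append(sorted_list[i])
--         i += 1
--     return result
-- ===== SOURCE B (Python) =====
-- def remove_values(sorted_list, remove_list):
--     """
--     Returns a new list which is sorted_list with any elements found in remove_list removed.
--     Both lists are assumed to be sorted.
--     """
--     result = []
--     start = 0
--     n = len(sorted_list)
--     for y in remove_list:
--         stop = next((k for k in range(start, n) if sorted_list[k] >= y), n)
--         result += sorted_list[start:stop]
--         start = stop
--         if start < n and sorted_list[start] == y: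
--             start += 1
--     result += sorted_list[start:]
--     return result
-- ===== Notes on version B (the rewrite author's own statement) =====
-- stated objective: alternative
-- what changed: Replaces A's element-by-element two-pointer merge loop (three-way comparison per element plus a leftover-copy loop) by an outer loop over remove_list that, for each remove value, finds the end of the block of smaller elements, copies that whole block with one slice, and skips at most one equal element; the final slice flushes the tail.
import Mathlib
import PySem

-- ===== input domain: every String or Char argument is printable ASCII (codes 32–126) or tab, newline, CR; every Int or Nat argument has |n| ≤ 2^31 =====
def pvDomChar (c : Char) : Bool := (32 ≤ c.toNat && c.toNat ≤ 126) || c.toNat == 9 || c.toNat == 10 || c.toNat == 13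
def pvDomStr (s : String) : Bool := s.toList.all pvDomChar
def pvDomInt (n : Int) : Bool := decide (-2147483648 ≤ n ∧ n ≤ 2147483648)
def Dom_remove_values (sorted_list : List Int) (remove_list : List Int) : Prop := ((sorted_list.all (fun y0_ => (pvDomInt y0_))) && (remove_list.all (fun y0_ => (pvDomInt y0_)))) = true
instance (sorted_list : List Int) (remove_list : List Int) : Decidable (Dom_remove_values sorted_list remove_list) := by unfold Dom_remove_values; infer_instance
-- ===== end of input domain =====

-- B replaces A's element-by-element two-pointer merge by an outer loop over remove_list that
-- copies, per remove value, the whole block of smaller elements with one slice and skips at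
-- most one equal element (objective: alternative; same O(n+m) cost; equal on every input).

-- ===== PORT A =====
-- first while loop of A (i, j walk both lists; result is the accumulator); on exit it runs
-- A's second while loop, which appends the leftover tail sorted_list[i:].  The fuel argument
-- is only a structural totality guard (each iteration increases i + j, so length s + length r
-- fuel is never exhausted while the loop condition holds); the computation is A's, step for step.
def rvLoop1 (s r : List Int) (fuel : Nat) (i j : Nat) (result : List Int) : List Int :=
  match fuel with
  | 0 => result ++ s.drop i
  | fuel + 1 =>
    if h : i < s.length ∧ j < r.length then
      if s[i] < r[j] then rvLoop1 s r fuel (i + 1) j (result ++ [s[i]])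
      else if s[i] > r[j] then rvLoop1 s r fuel i (j + 1) result
      else rvLoop1 s r fuel (i + 1) (j + 1) result
    else
      result ++ s.drop i

def remove_values (sorted_list : List Int) (remove_list : List Int) : List Int :=
  rvLoop1 sorted_list remove_list (sorted_list.length + remove_list.length) 0 0 []

-- ===== PORT B =====
-- stop = next((k for k in range(start, n) if sorted_list[k] >= y), n): the first index k ≥ start
-- with s[k] ≥ y, or n if there is none (structural recursion on n - k)
def rvStop (s : List Int) (y : Int) (k : Nat) : Nat :=
  if h : k < s.length then (if y ≤ s[k] then k else rvStop s y (k + 1)) else s.length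
termination_by s.length - k

-- body of B's for-loop over remove_list; the state is (start, result).
-- sorted_list[start:stop] with 0 ≤ start ≤ stop ≤ n is exactly List.extract start stop.
def rvStepB (s : List Int) (st : Nat × List Int) (y : Int) : Nat × List Int :=
  let stop := rvStop s y st.1
  let result := st.2 ++ s.extract st.1 stop
  let start := if h : stop < s.length then (if s[stop] = y then stop + 1 else stop) else stop
  (start, result)

def remove_values_alt (sorted_list : List Int) (remove_list : List Int) : List Int :=
  let st := remove_list.foldl (rvStepB sorted_list) (0, [])
  st.2 ++ sorted_list.drop st.1   -- sorted_list[start:] with 0 ≤ start is List.drop start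

-- ===== PRECONDITION & SPEC =====
def Spec_remove_values (sorted_list : List Int) (remove_list : List Int) (out : List Int) : Prop := out = remove_values_alt sorted_list remove_list
instance (sorted_list : List Int) (remove_list : List Int) (out : List Int) : Decidable (Spec_remove_values sorted_list remove_list out) := by unfold Spec_remove_values; infer_instance

-- ===== CLAIM (what is proved, stated in full; the proofs are below) =====
def Claim_equal_remove_values : Prop := ∀ (sorted_list : List Int) (remove_list : List Int), Dom_remove_values sorted_list remove_list → Spec_remove_values sorted_list remove_list (remove_values sorted_list remove_list)

-- ===== LEMMAS AND PROOFS =====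

-- canonical structural-recursive form of A's merge semantics
def rvMerge : List Int → List Int → List Int
  | s, [] => s
  | [], _ :: _ => []
  | x :: s, y :: r =>
    if x < y then x :: rvMerge s (y :: r)
    else if x > y then rvMerge (x :: s) r
    else rvMerge s r
termination_by s r => s.length + r.length

theorem rvMerge_nil_right (s : List Int) : rvMerge s [] = s := by
  cases s <;> rw [rvMerge]

theorem rvMerge_nil_left (l : List Int) : rvMerge [] l = [] := by
  cases l <;> rw [rvMerge]

theorem rvLoop1_eq_merge (s r : List Int) (fuel i j : Nat) (acc : List Int)
    (hfuel : (s.length - i) + (r.length - j) ≤ fuel) :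
    rvLoop1 s r fuel i j acc = acc ++ rvMerge (s.drop i) (r.drop j) := by
  induction fuel generalizing i j acc with
  | zero =>
    have hi : s.length ≤ i := by omega
    have hj : r.length ≤ j := by omega
    rw [rvLoop1, List.drop_eq_nil_of_le hi, List.drop_eq_nil_of_le hj, rvMerge]
  | succ fuel ih =>
    rw [rvLoop1]
    by_cases h : i < s.length ∧ j < r.length
    · rw [dif_pos h]
      rw [List.drop_eq_getElem_cons h.1, List.drop_eq_getElem_cons h.2, rvMerge]
      by_cases hlt : s[i] < r[j]
      · rw [if_pos hlt, if_pos hlt, ih (i + 1) j _ (by omega)]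
        simp
      · rw [if_neg hlt, if_neg hlt]
        by_cases hgt : s[i] > r[j]
        · rw [if_pos hgt, if_pos hgt, ih i (j + 1) _ (by omega),
              List.drop_eq_getElem_cons h.1]
        · rw [if_neg hgt, if_neg hgt, ih (i + 1) (j + 1) _ (by omega)]
    · rw [dif_neg h]
      rcases Nat.lt_or_ge i s.length with hi | hi
      · have hj : r.length ≤ j := by omega
        rw [List.drop_eq_getElem_cons hi, List.drop_eq_nil_of_le hj, rvMerge]
      · rw [List.drop_eq_nil_of_le hi]
        cases hr : r.drop j with
        | nil => rw [rvMerge]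
        | cons a t => rw [rvMerge]

theorem remove_values_eq_merge (s r : List Int) : remove_values s r = rvMerge s r := by
  simpa using rvLoop1_eq_merge s r (s.length + r.length) 0 0 [] (by omega)

theorem rvStop_hit (s : List Int) (y : Int) (k : Nat) (h : k < s.length)
    (hy : y ≤ s[k]) : rvStop s y k = k := by
  rw [rvStop]; simp [h, hy]

theorem rvStop_miss (s : List Int) (y : Int) (k : Nat) (h : k < s.length)
    (hy : ¬ y ≤ s[k]) : rvStop s y k = rvStop s y (k + 1) := by
  rw [rvStop]; simp [h, hy]

theorem rvStop_end (s : List Int) (y : Int) (k : Nat) (h : ¬ k < s.length) :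
    rvStop s y k = s.length := by
  rw [rvStop]; simp [h]

theorem le_rvStop (s : List Int) (y : Int) (k : Nat) (hk : k ≤ s.length) :
    k ≤ rvStop s y k := by
  fun_induction rvStop with
  | case1 k h hy => omega
  | case2 k h hy ih => have := ih (by omega); omega
  | case3 k h => exact hk

theorem rvExtract_nil (s : List Int) (a b : Nat) (hle : b ≤ a) : s.extract a b = [] := by
  simp [List.extract_eq_take_drop, Nat.sub_eq_zero_of_le hle]

-- one step of B processes y exactly as the merge does: the block of elements < y is copied,
-- one equal element (if present) is skipped, and the merge continues at the new start.
theorem rvStep_merge (s : List Int) (y : Int) (r : List Int) (start : Nat) :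
    rvMerge (s.drop start) (y :: r) =
      s.extract start (rvStop s y start) ++
        rvMerge (s.drop ((rvStepB s (start, []) y).1)) r := by
  fun_induction rvStop s y start with
  | case1 k h hy =>
    -- s[k] ≥ y : the block is empty
    rw [List.drop_eq_getElem_cons h, rvMerge, if_neg (by omega : ¬ s[k] < y)]
    have hse : rvStop s y k = k := rvStop_hit s y k h hy
    by_cases heq : s[k] = y
    · rw [if_neg (by omega : ¬ s[k] > y)]
      have hfst : (rvStepB s (k, []) y).1 = k + 1 := by
        simp only [rvStepB, hse]
        rw [dif_pos h, if_pos heq]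
      rw [hfst, rvExtract_nil s k k (by omega), List.nil_append]
    · rw [if_pos (by omega : s[k] > y)]
      have hfst : (rvStepB s (k, []) y).1 = k := by
        simp only [rvStepB, hse]
        rw [dif_pos h, if_neg heq]
      rw [hfst, rvExtract_nil s k k (by omega), List.nil_append,
          List.drop_eq_getElem_cons h]
  | case2 k h hy ih =>
    -- s[k] < y : s[k] is copied and the scan continues at k + 1
    rw [List.drop_eq_getElem_cons h, rvMerge, if_pos (by omega : s[k] < y), ih]
    have hstep : (rvStepB s (k, []) y).1 = (rvStepB s (k + 1, []) y).1 := by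
      simp only [rvStepB, rvStop_miss s y k h hy]
    rw [hstep]
    have hstop : k + 1 ≤ rvStop s y (k + 1) := le_rvStop s y (k + 1) (by omega)
    have hext : s.extract k (rvStop s y (k + 1)) =
        s[k] :: s.extract (k + 1) (rvStop s y (k + 1)) := by
      rw [List.extract_eq_take_drop, List.extract_eq_take_drop,
          List.drop_eq_getElem_cons h,
          show rvStop s y (k + 1) - k = (rvStop s y (k + 1) - (k + 1)) + 1 by omega,
          List.take_succ_cons]
    rw [hext, List.cons_append]
  | case3 k h =>
    -- start past the end: everything is empty
    have hk : s.length ≤ k := by omega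
    have hfst : (rvStepB s (k, []) y).1 = s.length := by
      simp only [rvStepB, rvStop_end s y k h]
      rw [dif_neg (by omega)]
    rw [hfst, List.drop_eq_nil_of_le hk, List.drop_length, rvMerge_nil_left,
        rvMerge_nil_left, rvExtract_nil s k s.length hk]
    rfl

-- invariant of B's fold: flushing the state reproduces the merge from the current start
theorem rvFold_merge (s : List Int) (r : List Int) (start : Nat) (res : List Int) :
    (let st := r.foldl (rvStepB s) (start, res); st.2 ++ s.drop st.1) =
      res ++ rvMerge (s.drop start) r := by
  induction r generalizing start res with
  | nil => simp [rvMerge_nil_right]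
  | cons y r ih =>
    simp only [List.foldl_cons]
    have hst : rvStepB s (start, res) y =
        ((rvStepB s (start, []) y).1, res ++ s.extract start (rvStop s y start)) := by
      simp only [rvStepB]
    rw [hst, ih, rvStep_merge s y r start, List.append_assoc]

-- ===== VERDICT (by name: the statement is the Claim_ definition above) =====
theorem remove_values_spec : Claim_equal_remove_values := by
  intro s r _
  show remove_values s r = remove_values_alt s r
  rw [remove_values_eq_merge]
  unfold remove_values_alt
  rw [rvFold_merge s r 0 []]
  simp
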